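-- pv_equiv track=rewrite | github.com/ch11en/GDP | codes/eval_utils.py | split_imp_exp_instances
-- ===== SOURCE A (Python) =====
-- def split_imp_exp_instances(instances):
--     ee_instances, ei_instances, ie_instances, ii_instances = [], [], [], []
--     for instance in instances:
--         ac, at, sp, ot = instance
--         if at == "NULL" and ot == "NULL":
--             ii_instances.append(instance)
--         elif at == "NULL" and ot != "NULL":
--             ie_instances.append(instance)
--         elif at != "NULL" and ot == "NULL":
--             ei_instances.append(instance)
--         else:
--             ee_instances.append(instance)
--     return ee_instances, ei_instances, ie_instances, ii_instances
-- ===== SOURCE B (Python) =====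
-- def split_imp_exp_instances(instances):
--     ee_instances = [inst for inst in instances if inst[1] != "NULL" and inst[3] != "NULL"]
--     ei_instances = [inst for inst in instances if inst[1] != "NULL" and inst[3] == "NULL"]
--     ie_instances = [inst for inst in instances if inst[1] == "NULL" and inst[3] != "NULL"]
--     ii_instances = [inst for inst in instances if inst[1] == "NULL" and inst[3] == "NULL"]
--     return ee_instances, ei_instances, ie_instances, ii_instances
-- ===== Notes on version B (the rewrite author's own statement) =====
-- stated objective: idiomatic
-- what changed: Replaced the single accumulator loop with a four-way if/elif chain by four independent filtering comprehensions, one per category.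
import Mathlib
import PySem

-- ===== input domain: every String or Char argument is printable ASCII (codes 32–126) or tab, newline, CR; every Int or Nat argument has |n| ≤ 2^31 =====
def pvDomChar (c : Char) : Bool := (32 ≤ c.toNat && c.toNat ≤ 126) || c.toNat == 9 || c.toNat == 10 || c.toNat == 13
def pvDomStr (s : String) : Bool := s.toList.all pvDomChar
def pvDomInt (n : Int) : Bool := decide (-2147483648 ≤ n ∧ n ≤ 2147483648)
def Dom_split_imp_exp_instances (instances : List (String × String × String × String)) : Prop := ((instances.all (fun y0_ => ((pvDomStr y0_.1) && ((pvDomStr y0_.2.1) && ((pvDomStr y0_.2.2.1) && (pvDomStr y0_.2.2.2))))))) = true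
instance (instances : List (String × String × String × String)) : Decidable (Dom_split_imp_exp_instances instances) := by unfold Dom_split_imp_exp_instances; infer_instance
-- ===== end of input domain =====

-- B replaces A's single loop with an if/elif chain by four independent filter passes (idiomatic; return value identical).

-- ===== PORT A =====
-- literal port of A: one pass, four accumulators, if/elif chain in the same order
def split_imp_exp_instances (instances : List (String × String × String × String)) : (List (String × String × String × String)) × (List (String × String × String × String)) × (List (String × String × String × String)) × (List (String × String × String × String)) :=
  let acc := instances.foldl (fun (s : (List (String × String × String × String)) × (List (String × String × String × String)) × (List (String × String × String × String)) × (List (String × String × String × String))) instance_ =>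
    let (ee, ei, ie, ii) := s
    let (_ac, at_, _sp, ot) := instance_
    if at_ = "NULL" ∧ ot = "NULL" then (ee, ei, ie, ii ++ [instance_])
    else if at_ = "NULL" ∧ ot ≠ "NULL" then (ee, ei, ie ++ [instance_], ii)
    else if at_ ≠ "NULL" ∧ ot = "NULL" then (ee, ei ++ [instance_], ie, ii)
    else (ee ++ [instance_], ei, ie, ii)) ([], [], [], [])
  acc

-- ===== PORT B =====
-- port of B: four filtering comprehensions
def split_imp_exp_instances_alt (instances : List (String × String × String × String)) : (List (String × String × String × String)) × (List (String × String × String × String)) × (List (String × String × String × String)) × (List (String × String × String × String)) :=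
  (instances.filter (fun i => i.2.1 != "NULL" && i.2.2.2 != "NULL"),
   instances.filter (fun i => i.2.1 != "NULL" && i.2.2.2 == "NULL"),
   instances.filter (fun i => i.2.1 == "NULL" && i.2.2.2 != "NULL"),
   instances.filter (fun i => i.2.1 == "NULL" && i.2.2.2 == "NULL"))

-- ===== PRECONDITION & SPEC =====
def Spec_split_imp_exp_instances (instances : List (String × String × String × String)) (out : (List (String × String × String × String)) × (List (String × String × String × String)) × (List (String × String × String × String)) × (List (String × String × String × String))) : Prop := out = split_imp_exp_instances_alt instances
instance (instances : List (String × String × String × String)) (out : (List (String × String × String × String)) × (List (String × String × String × String)) × (List (String × String × String × String)) × (List (String × String × String × String))) : Decidable (Spec_split_imp_exp_instances instances out) := by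
  unfold Spec_split_imp_exp_instances
  exact @instDecidableEqProd _ _ _ (@instDecidableEqProd _ _ _ (@instDecidableEqProd _ _ _ _)) out (split_imp_exp_instances_alt instances)

-- ===== CLAIM (what is proved, stated in full; the proofs are below) =====
def Claim_equal_split_imp_exp_instances : Prop := ∀ (instances : List (String × String × String × String)), Dom_split_imp_exp_instances instances → Spec_split_imp_exp_instances instances (split_imp_exp_instances instances)

-- ===== LEMMAS AND PROOFS =====

-- loop invariant: the fold appends each element's filtrate to the running accumulators
lemma split_foldl_inv (instances : List (String × String × String × String))
    (ee ei ie ii : List (String × String × String × String)) :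
    instances.foldl (fun (s : (List (String × String × String × String)) × (List (String × String × String × String)) × (List (String × String × String × String)) × (List (String × String × String × String))) instance_ =>
      let (ee, ei, ie, ii) := s
      let (_ac, at_, _sp, ot) := instance_
      if at_ = "NULL" ∧ ot = "NULL" then (ee, ei, ie, ii ++ [instance_])
      else if at_ = "NULL" ∧ ot ≠ "NULL" then (ee, ei, ie ++ [instance_], ii)
      else if at_ ≠ "NULL" ∧ ot = "NULL" then (ee, ei ++ [instance_], ie, ii)
      else (ee ++ [instance_], ei, ie, ii)) (ee, ei, ie, ii)
    = (ee ++ instances.filter (fun i => i.2.1 != "NULL" && i.2.2.2 != "NULL"),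
       ei ++ instances.filter (fun i => i.2.1 != "NULL" && i.2.2.2 == "NULL"),
       ie ++ instances.filter (fun i => i.2.1 == "NULL" && i.2.2.2 != "NULL"),
       ii ++ instances.filter (fun i => i.2.1 == "NULL" && i.2.2.2 == "NULL")) := by
  induction instances generalizing ee ei ie ii with
  | nil => simp
  | cons x xs ih =>
    obtain ⟨ac, at_, sp, ot⟩ := x
    by_cases h1 : at_ = "NULL" <;> by_cases h2 : ot = "NULL" <;>
      simp [List.foldl_cons, h1, h2, ih, List.append_assoc]

theorem split_imp_exp_instances_spec_aux (instances : List (String × String × String × String)) :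
    split_imp_exp_instances instances = split_imp_exp_instances_alt instances := by
  unfold split_imp_exp_instances split_imp_exp_instances_alt
  simpa using split_foldl_inv instances [] [] [] []

-- ===== VERDICT (by name: the statement is the Claim_ definition above) =====
theorem split_imp_exp_instances_spec : Claim_equal_split_imp_exp_instances := by
  intro instances _
  unfold Spec_split_imp_exp_instances
  exact split_imp_exp_instances_spec_aux instances
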